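-- pv_equiv track=rewrite | github.com/kow-k/generators-of-skippy-ngrams | gen2_ngrams.py | drop_gap_at_end
-- ===== SOURCE A (Python) =====
-- def drop_gap_at_end(segs: list, gap_mark: str):
--
--     F = []
--     for i, seg in enumerate(segs):
--         if seg != gap_mark:
--             F.append(seg)
--         else:
--             if i == 0 or i == (len(segs) - 1):
--                 pass
--             else:
--                 F.append(seg)
--     ##
--     return F
-- ===== SOURCE B (Python) =====
-- def drop_gap_at_end(segs: list, gap_mark: str):
--     start = 1 if segs and segs[0] == gap_mark else 0
--     end = len(segs) - 1 if segs and segs[-1] == gap_mark else len(segs)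
--     return segs[start:end]
-- ===== Notes on version B (the rewrite author's own statement) =====
-- stated objective: simpler
-- what changed: Replaced the per-element loop over enumerate with two boundary checks and a single slice: only a gap_mark at the first or last position is ever dropped, so the result is segs[start:end].
import Mathlib
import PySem

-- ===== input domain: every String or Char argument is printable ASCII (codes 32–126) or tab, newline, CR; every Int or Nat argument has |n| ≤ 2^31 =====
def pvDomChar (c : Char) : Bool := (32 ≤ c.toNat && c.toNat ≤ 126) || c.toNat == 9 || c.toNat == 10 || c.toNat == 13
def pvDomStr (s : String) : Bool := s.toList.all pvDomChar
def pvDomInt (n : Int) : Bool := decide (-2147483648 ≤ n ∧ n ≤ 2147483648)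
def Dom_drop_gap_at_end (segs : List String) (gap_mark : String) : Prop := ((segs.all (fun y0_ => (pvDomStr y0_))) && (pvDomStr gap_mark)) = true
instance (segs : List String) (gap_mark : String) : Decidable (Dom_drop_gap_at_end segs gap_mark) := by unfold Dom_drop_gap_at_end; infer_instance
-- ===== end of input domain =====

-- B replaces the element-by-element loop with two boundary checks and one slice (simpler; same O(n) cost).


-- ===== PORT A =====
-- literal transliteration of A: loop over enumerate(segs), append unless gap_mark at index 0 or len-1
def drop_gap_at_end (segs : List String) (gap_mark : String) : List String :=
  (PySem.List.enumerate segs 0).foldl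
    (fun F p =>
      if p.2 ≠ gap_mark then F ++ [p.2]
      else if p.1 = 0 ∨ p.1 = (segs.length : Int) - 1 then F
      else F ++ [p.2]) []

-- ===== PORT B =====
-- literal transliteration of B: two boundary checks, then one slice
def drop_gap_at_end_alt (segs : List String) (gap_mark : String) : List String :=
  let start : Int := if segs ≠ [] ∧ segs[0]? = some gap_mark then 1 else 0
  let stop : Int := if segs ≠ [] ∧ segs[segs.length - 1]? = some gap_mark then (segs.length : Int) - 1 else (segs.length : Int)
  PySem.List.slice segs (some start) (some stop)

-- ===== PRECONDITION & SPEC =====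
def Spec_drop_gap_at_end (segs : List String) (gap_mark : String) (out : List String) : Prop := out = drop_gap_at_end_alt segs gap_mark
instance (segs : List String) (gap_mark : String) (out : List String) : Decidable (Spec_drop_gap_at_end segs gap_mark out) := by unfold Spec_drop_gap_at_end; infer_instance

-- ===== CLAIM (what is proved, stated in full; the proofs are below) =====
def Claim_equal_drop_gap_at_end : Prop := ∀ (segs : List String) (gap_mark : String), Dom_drop_gap_at_end segs gap_mark → Spec_drop_gap_at_end segs gap_mark (drop_gap_at_end segs gap_mark)

-- ===== LEMMAS AND PROOFS =====

-- A's fold is the filter of the enumerated list, keeping p unless p.2 = gap_mark ∧ (p.1 = 0 ∨ p.1 = n-1)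
theorem dropA_eq_filter (segs : List String) (gap_mark : String) :
    drop_gap_at_end segs gap_mark =
      ((PySem.List.enumerate segs 0).filter
        (fun p => decide (p.2 ≠ gap_mark ∨ (p.1 ≠ 0 ∧ p.1 ≠ (segs.length : Int) - 1)))).map (·.2) := by
  unfold drop_gap_at_end
  rw [show (fun (F : List String) (p : Int × String) =>
      if p.2 ≠ gap_mark then F ++ [p.2]
      else if p.1 = 0 ∨ p.1 = (segs.length : Int) - 1 then F
      else F ++ [p.2])
    = (fun F p =>
      if decide (p.2 ≠ gap_mark ∨ (p.1 ≠ 0 ∧ p.1 ≠ (segs.length : Int) - 1)) = true then F ++ [p.2] else F) from by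
      funext F p
      by_cases h1 : p.2 = gap_mark <;> by_cases h2 : p.1 = 0 ∨ p.1 = (segs.length : Int) - 1 <;>
        simp [h1, h2] <;> tauto]
  rw [PySem.List.foldl_append_if]
  simp

-- every element of the middle enumerate (indices 1 .. m.length) is kept by the filter
theorem filter_middle (m : List String) (gap_mark : String) (n : Int) (hn : (m.length : Int) + 1 ≤ n - 1) :
    ((PySem.List.enumerate m 1).filter
        (fun p => decide (p.2 ≠ gap_mark ∨ (p.1 ≠ 0 ∧ p.1 ≠ n - 1)))).map (·.2) = m := by
  rw [List.filter_eq_self.mpr, PySem.List.map_snd_enumerate]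
  intro p hp
  rcases (PySem.List.mem_enumerate_iff _ _ _).1 hp with ⟨k, hk, rfl⟩
  have : (k : Int) < (m.length : Int) := by exact_mod_cast hk
  simp only [decide_eq_true_eq]
  right
  constructor <;> omega

theorem drop_gap_at_end_main (segs : List String) (gap_mark : String) :
    drop_gap_at_end segs gap_mark = drop_gap_at_end_alt segs gap_mark := by
  rw [dropA_eq_filter]
  unfold drop_gap_at_end_alt
  rcases segs with _ | ⟨a, l⟩
  · simp [PySem.List.enumerate, PySem.List.slice]
  rcases List.eq_nil_or_concat l with rfl | ⟨m, b, rfl⟩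
  · -- single element [a]
    rw [PySem.List.slice_toNat _ (by split <;> norm_num) (by split <;> norm_num)]
    by_cases h : a = gap_mark <;>
      simp [PySem.List.enumerate_cons, PySem.List.enumerate_nil, h]
  · -- a :: m ++ [b]
    simp only [List.concat_eq_append]
    have hlen : ((a :: (m ++ [b])).length : Int) = (m.length : Int) + 2 := by
      simp; push_cast; ring
    rw [show PySem.List.enumerate (a :: (m ++ [b])) 0
        = (0, a) :: (PySem.List.enumerate m 1 ++ [((1 : Int) + m.length, b)]) from by
      rw [PySem.List.enumerate_cons, PySem.List.enumerate_append, PySem.List.enumerate_cons,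
        PySem.List.enumerate_nil]; norm_num]
    have hmid := filter_middle m gap_mark ((m.length : Int) + 2) (by omega)
    have hget0 : (a :: (m ++ [b]))[0]? = some a := rfl
    have hgetlast : (a :: (m ++ [b]))[(a :: (m ++ [b])).length - 1]? = some b := by simp
    rw [PySem.List.slice_toNat _ (by split <;> norm_num) (by split <;> (rw [hlen]; omega))]
    by_cases ha : a = gap_mark <;> by_cases hb : b = gap_mark
    · simp only [hlen, List.filter_cons, List.filter_append, List.filter_singleton]
      rw [if_neg (by simp [ha]), if_neg (by simp [hb]; omega)]
      simp only [List.filter_nil, List.append_nil, List.map_append, List.map_cons, List.map_nil]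
      rw [hmid]
      have hN : ((m.length : Int) + 2).toNat = m.length + 2 := by omega
      have e1 : ((m.length : Int) + 2 - 1).toNat - (1 : Int).toNat = m.length := by omega
      simp [hget0, hgetlast, ha, hb, e1, hN, List.take_append, List.take_of_length_le]
    · simp only [hlen, List.filter_cons, List.filter_append, List.filter_singleton]
      rw [if_neg (by simp [ha]), if_pos (by simp [hb])]
      simp only [List.filter_nil, List.append_nil, List.map_append, List.map_cons, List.map_nil]
      rw [hmid]
      have hN : ((m.length : Int) + 2).toNat = m.length + 2 := by omega
      have e1 : ((m.length : Int) + 2).toNat - (1 : Int).toNat = m.length + 1 := by omega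
      simp [hget0, hgetlast, ha, hb, e1, hN, List.take_append, List.take_of_length_le]
    · simp only [hlen, List.filter_cons, List.filter_append, List.filter_singleton]
      rw [if_pos (by simp [ha]), if_neg (by simp [hb]; omega)]
      simp only [List.filter_nil, List.append_nil, List.map_append, List.map_cons, List.map_nil]
      rw [hmid]
      have hN : ((m.length : Int) + 2).toNat = m.length + 2 := by omega
      have e1 : ((m.length : Int) + 2 - 1).toNat - (0 : Int).toNat = m.length + 1 := by omega
      simp [hget0, hgetlast, ha, hb, e1, hN, List.take_append, List.take_of_length_le]
    · simp only [hlen, List.filter_cons, List.filter_append, List.filter_singleton]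
      rw [if_pos (by simp [ha]), if_pos (by simp [hb])]
      simp only [List.filter_nil, List.append_nil, List.map_append, List.map_cons, List.map_nil]
      rw [hmid]
      have hN : ((m.length : Int) + 2).toNat = m.length + 2 := by omega
      have e1 : ((m.length : Int) + 2).toNat - (0 : Int).toNat = m.length + 2 := by omega
      simp [hget0, hgetlast, ha, hb, e1, hN, List.take_append, List.take_of_length_le]

-- ===== VERDICT (by name: the statement is the Claim_ definition above) =====
theorem drop_gap_at_end_spec : Claim_equal_drop_gap_at_end := by
  intro segs gap_mark _
  exact drop_gap_at_end_main segs gap_mark
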